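-- pv_equiv track=rewrite | github.com/ESCOTaylorC/AIProtoype | utilities.py | format_pseudocode
-- ===== SOURCE A (Python) =====
-- def format_pseudocode(code):
--     """Format pseudocode with proper indentation and structure."""
--     lines = code.split('\n')
--     formatted_lines = []
--     indent_level = 0
--
--     for line in lines:
--         line = line.strip()
--         if line.startswith('END') or line.startswith('}'):
--             indent_level -= 1
--         formatted_lines.append('    ' * indent_level + line)
--         if line.endswith('THEN') or line.endswith('{'):
--             indent_level += 1
--
--     return '\n'.join(formatted_lines)
-- ===== SOURCE B (Python) =====
-- def _prefix_sums(deltas):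
--     sums = [0]
--     for d in deltas:
--         sums.append(sums[-1] + d)
--     return sums
--
--
-- def format_pseudocode(code):
--     """Format pseudocode with proper indentation and structure."""
--     lines = [line.strip() for line in code.split('\n')]
--     pre = [-1 if l.startswith(('END', '}')) else 0 for l in lines]
--     post = [1 if l.endswith(('THEN', '{')) else 0 for l in lines]
--     sums = _prefix_sums([p + q for p, q in zip(pre, post)])
--     return '\n'.join('    ' * (s + p) + l
--                      for s, p, l in zip(sums, pre, lines))
-- ===== Notes on version B (the rewrite author's own statement) =====
-- stated objective: alternative
-- what changed: Replaces A's single mutating-counter loop with a pipeline: strip all lines, compute per-line pre/post indent deltas, take a prefix sum of the combined deltas, then format each line at level prefix_sum + pre_delta.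
import Mathlib
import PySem

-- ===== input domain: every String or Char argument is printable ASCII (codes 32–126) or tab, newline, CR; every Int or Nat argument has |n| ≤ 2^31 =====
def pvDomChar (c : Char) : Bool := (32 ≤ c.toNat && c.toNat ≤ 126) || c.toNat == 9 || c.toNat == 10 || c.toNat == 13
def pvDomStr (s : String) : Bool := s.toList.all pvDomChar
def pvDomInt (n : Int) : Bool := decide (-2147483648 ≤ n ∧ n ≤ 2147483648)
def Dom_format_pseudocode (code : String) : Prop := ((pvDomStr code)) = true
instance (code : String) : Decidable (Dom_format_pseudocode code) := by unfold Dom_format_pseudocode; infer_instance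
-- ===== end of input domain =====

-- B replaces A's single mutating-counter loop with a deltas → prefix-sum → format pipeline (alternative decomposition, same cost).

-- Python's '    ' * n (empty for n ≤ 0); used by both ports, as both Pythons write '    ' * level
def pvStrTimes (s : String) (n : Int) : String := String.join (List.replicate n.toNat s)

-- ===== PORT A =====
def format_pseudocode (code : String) : String :=
  let lines := (PySem.Str.split? code "\n").getD []
  let st := lines.foldl (fun st line =>
      let line := PySem.Str.strip line
      let lvl := if PySem.Str.startswith line "END" || PySem.Str.startswith line "}" then st.1 - 1 else st.1
      let fl := st.2 ++ [pvStrTimes "    " lvl ++ line]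
      let lvl := if PySem.Str.endswith line "THEN" || PySem.Str.endswith line "{" then lvl + 1 else lvl
      (lvl, fl)) ((0 : Int), ([] : List String))
  PySem.Str.join "\n" st.2

-- ===== PORT B =====
def pvPre (l : String) : Int :=
  if PySem.Str.startswith l "END" || PySem.Str.startswith l "}" then -1 else 0

def pvPost (l : String) : Int :=
  if PySem.Str.endswith l "THEN" || PySem.Str.endswith l "{" then 1 else 0

-- _prefix_sums: sums = [0]; for d in deltas: sums.append(sums[-1] + d)
def pvPrefixSums (c : Int) : List Int → List Int
  | [] => [c]
  | d :: ds => c :: pvPrefixSums (c + d) ds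

-- the final zip-of-three comprehension
def pvEmit : List Int → List Int → List String → List String
  | s :: ss, p :: ps, l :: ls => (pvStrTimes "    " (s + p) ++ l) :: pvEmit ss ps ls
  | _, _, _ => []

def format_pseudocode_alt (code : String) : String :=
  let lines := ((PySem.Str.split? code "\n").getD []).map PySem.Str.strip
  let pre := lines.map pvPre
  let post := lines.map pvPost
  let sums := pvPrefixSums 0 (List.zipWith (fun p q => p + q) pre post)
  PySem.Str.join "\n" (pvEmit sums pre lines)

-- ===== PRECONDITION & SPEC =====
def Spec_format_pseudocode (code : String) (out : String) : Prop := out = format_pseudocode_alt code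
instance (code : String) (out : String) : Decidable (Spec_format_pseudocode code out) := by unfold Spec_format_pseudocode; infer_instance

-- ===== CLAIM (what is proved, stated in full; the proofs are below) =====
def Claim_equal_format_pseudocode : Prop := ∀ (code : String), Dom_format_pseudocode code → Spec_format_pseudocode code (format_pseudocode code)

-- ===== LEMMAS AND PROOFS =====

-- common recursive characterisation: the formatted lines for stripped input `ls` starting at level c
def pvRef (c : Int) : List String → List String
  | [] => []
  | l :: ls => (pvStrTimes "    " (c + pvPre l) ++ l) :: pvRef (c + pvPre l + pvPost l) ls

lemma loopA (lines : List String) (c : Int) (acc : List String) :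
    (lines.foldl (fun st line =>
      let line := PySem.Str.strip line
      let lvl := if PySem.Str.startswith line "END" || PySem.Str.startswith line "}" then st.1 - 1 else st.1
      let fl := st.2 ++ [pvStrTimes "    " lvl ++ line]
      let lvl := if PySem.Str.endswith line "THEN" || PySem.Str.endswith line "{" then lvl + 1 else lvl
      (lvl, fl)) (c, acc)).2 = acc ++ pvRef c (lines.map PySem.Str.strip) := by
  induction lines generalizing c acc with
  | nil => simp [pvRef]
  | cons l ls ih =>
    simp only [List.foldl_cons, List.map_cons, pvRef]
    rw [ih]
    simp only [pvPre, pvPost, List.append_assoc, List.singleton_append]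
    split_ifs <;> simp [sub_eq_add_neg]

lemma loopB (c : Int) (ls : List String) :
    pvEmit (pvPrefixSums c (List.zipWith (fun p q => p + q) (ls.map pvPre) (ls.map pvPost))) (ls.map pvPre) ls
      = pvRef c ls := by
  induction ls generalizing c with
  | nil => simp [pvPrefixSums, pvEmit, pvRef]
  | cons l ls ih =>
    simp only [List.map_cons, List.zipWith_cons_cons, pvPrefixSums, pvEmit, pvRef]
    rw [← add_assoc, ih]

-- ===== VERDICT (by name: the statement is the Claim_ definition above) =====
theorem format_pseudocode_spec : Claim_equal_format_pseudocode := by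
  intro code _
  unfold Spec_format_pseudocode format_pseudocode format_pseudocode_alt
  simp only [loopA, loopB, List.nil_append]
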